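-- pv_equiv track=rewrite | github.com/z7La/pythonProject | 13/135 - Ряд xxx.py | calc
-- ===== SOURCE A (Python) =====
-- def calc(v0):
--     v1 = 0
--     res3 = 0
--     for i in range(4):
--         if i == 0:
--             v1 = v0 + 1
--             res1 = v0 + v1
--             v1 += 1
--             res2 = res1 * v1
--             res3 = res2
--         else:
--             v1 += 1
--             res11 = res3 + v1
--             v1 += 1
--             res22 = res11 * v1
--             res3 = res22
--     return res3
-- ===== SOURCE B (Python) =====
-- def calc(v0):
--     # closed form: telescoped recurrence, v1 takes values v0+1 .. v0+8
--     return ((((2*v0 + 1) * (v0 + 2) + v0 + 3) * (v0 + 4) + v0 + 5) * (v0 + 6) + v0 + 7) * (v0 + 8)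
-- ===== Notes on version B (the rewrite author's own statement) =====
-- stated objective: simpler
-- what changed: Replaced the fixed-length loop with its first-iteration special case by a single closed-form nested arithmetic expression for the final value.
import Mathlib
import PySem

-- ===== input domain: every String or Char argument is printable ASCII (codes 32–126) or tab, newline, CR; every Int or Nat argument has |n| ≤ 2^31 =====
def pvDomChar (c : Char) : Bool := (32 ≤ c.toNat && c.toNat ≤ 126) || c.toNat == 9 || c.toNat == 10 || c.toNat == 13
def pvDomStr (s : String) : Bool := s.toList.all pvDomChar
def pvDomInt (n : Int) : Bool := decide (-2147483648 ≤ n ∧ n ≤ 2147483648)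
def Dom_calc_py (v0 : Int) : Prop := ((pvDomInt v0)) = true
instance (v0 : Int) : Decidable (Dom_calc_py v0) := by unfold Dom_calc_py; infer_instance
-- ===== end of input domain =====

-- ===== PORT A =====
-- loop over range(4): state (v1, res3); branch order as in A
def calcStep (v0 : Int) (st : Int × Int) (i : Int) : Int × Int :=
  if i = 0 then
    let v1 := v0 + 1
    let res1 := v0 + v1
    let v1 := v1 + 1
    let res2 := res1 * v1
    (v1, res2)
  else
    let v1 := st.1 + 1
    let res11 := st.2 + v1
    let v1 := v1 + 1
    let res22 := res11 * v1
    (v1, res22)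

def calc_py (v0 : Int) : Int :=
  ((PySem.List.pyRange 0 4 1).foldl (calcStep v0) (0, 0)).2

-- ===== PORT B =====
def calc_py_alt (v0 : Int) : Int :=
  ((((2*v0 + 1) * (v0 + 2) + v0 + 3) * (v0 + 4) + v0 + 5) * (v0 + 6) + v0 + 7) * (v0 + 8)

-- ===== PRECONDITION & SPEC =====
def Spec_calc_py (v0 : Int) (out : Int) : Prop := out = calc_py_alt v0
instance (v0 : Int) (out : Int) : Decidable (Spec_calc_py v0 out) := by unfold Spec_calc_py; infer_instance

-- ===== CLAIM (what is proved, stated in full; the proofs are below) =====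
def Claim_equal_calc_py : Prop := ∀ (v0 : Int), Dom_calc_py v0 → Spec_calc_py v0 (calc_py v0)

-- ===== LEMMAS AND PROOFS =====

-- ===== VERDICT (by name: the statement is the Claim_ definition above) =====
theorem calc_py_spec : Claim_equal_calc_py := by
  intro v0 _
  unfold Spec_calc_py calc_py calc_py_alt
  simp [PySem.List.pyRange, List.range_succ, calcStep, List.foldl]
  ring
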